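-- pv_equiv track=rewrite | github.com/Big-Shrine/Cs_class_12 | extra.py | remove_consecutive_3s
-- ===== SOURCE A (Python) =====
-- def remove_consecutive_3s(x):
--     x_str = str(x)
--     new_x_str = ""
--     skip_next = False
--
--     for i in range(len(x_str) - 1):
--         if skip_next:
--             skip_next = False
--             continue
--         if x_str[i] == '3' and x_str[i + 1] == '3':
--             skip_next = True
--         else:
--             new_x_str += x_str[i]
--
--
--     if not skip_next:
--         new_x_str += x_str[-1]
--
--
--     return int(new_x_str) if new_x_str else 0
-- ===== SOURCE B (Python) =====
-- def remove_consecutive_3s(x):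
--     new = str(x).replace('33', '')
--     return int(new) if new else 0
-- ===== Notes on version B (the rewrite author's own statement) =====
-- stated objective: idiomatic
-- what changed: Replaces the manual index loop with a skip flag and a separate last-character step by a single str.replace('33','') (non-overlapping left-to-right, exactly the greedy pair removal) followed by the same int/empty guard.
import Mathlib
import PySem

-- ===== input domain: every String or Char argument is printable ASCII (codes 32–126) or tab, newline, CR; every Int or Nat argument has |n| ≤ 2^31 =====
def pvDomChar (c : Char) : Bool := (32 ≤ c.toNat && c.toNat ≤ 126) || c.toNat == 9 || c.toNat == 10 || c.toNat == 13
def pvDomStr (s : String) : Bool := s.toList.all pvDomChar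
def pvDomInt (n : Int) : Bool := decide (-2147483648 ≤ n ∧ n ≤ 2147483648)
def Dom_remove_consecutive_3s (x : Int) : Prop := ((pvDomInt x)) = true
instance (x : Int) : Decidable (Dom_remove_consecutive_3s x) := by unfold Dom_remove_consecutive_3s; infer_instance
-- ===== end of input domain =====

-- B replaces A's skip-flag index loop by a single str.replace('33','') with the same int/empty guard (idiomatic; same cost).

-- ===== PORT A =====
-- A's 'for i in range(len(x_str)-1)' loop looking at x_str[i], x_str[i+1] with the
-- skip flag, transliterated as the obvious recursion over the character list that
-- still sees the current character and its successor; state = (new_x_str, skip_next).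
def pvALoop : List Char → Bool → List Char → List Char × Bool
  | a :: b :: t, skip, acc =>
      if skip then pvALoop (b :: t) false acc
      else if a = '3' ∧ b = '3' then pvALoop (b :: t) true acc
      else pvALoop (b :: t) false (acc ++ [a])
  | _, skip, acc => (acc, skip)

def remove_consecutive_3s (x : Int) : Int :=
  let x_str := (PySem.Int.toStr x).toList
  let r := pvALoop x_str false []
  -- 'if not skip_next: new_x_str += x_str[-1]' — x_str[-1] via pyGet?; str(x) is
  -- never empty, so the option is always some (Option.toList appends that one char).
  let new_x_str := if r.2 then r.1 else r.1 ++ (PySem.List.pyGet? x_str (-1)).toList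
  -- 'return int(new_x_str) if new_x_str else 0'; int() raising (new_x_str = "-") is excluded by Pre_.
  if new_x_str = [] then 0 else (PySem.Int.ofChars? new_x_str).getD 0

-- ===== PORT B =====
def remove_consecutive_3s_alt (x : Int) : Int :=
  let new := PySem.Str.replace (PySem.Int.toStr x) "33" ""
  if new = "" then 0 else (PySem.Int.ofStr? new).getD 0

-- ===== PRECONDITION & SPEC =====
-- Pre_ excludes the inputs on which BOTH Pythons raise ValueError (int("-")): negative x
-- whose digits are all '3' in even number — there the pair removal leaves only the minus sign.
def Pre_remove_consecutive_3s (x : Int) : Prop :=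
  ¬ (x < 0 ∧ (PySem.Int.toChars (-x)).all (fun c => c = '3') = true
       ∧ (PySem.Int.toChars (-x)).length % 2 = 0)
instance (x : Int) : Decidable (Pre_remove_consecutive_3s x) := by
  unfold Pre_remove_consecutive_3s; infer_instance

def pvWitness_remove_consecutive_3s : Int := 3343

def Spec_remove_consecutive_3s (x : Int) (out : Int) : Prop := out = remove_consecutive_3s_alt x
instance (x : Int) (out : Int) : Decidable (Spec_remove_consecutive_3s x out) := by unfold Spec_remove_consecutive_3s; infer_instance

-- ===== CLAIM (what is proved, stated in full; the proofs are below) =====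
def Claim_equal_remove_consecutive_3s : Prop := ∀ (x : Int), Dom_remove_consecutive_3s x → Pre_remove_consecutive_3s x → Spec_remove_consecutive_3s x (remove_consecutive_3s x)

-- ===== LEMMAS AND PROOFS =====

-- The common greedy left-to-right removal of '33' pairs, as a recursion.
def pvG : List Char → List Char
  | a :: b :: t => if a = '3' ∧ b = '3' then pvG t else a :: pvG (b :: t)
  | l => l

-- A's loop accumulator factors out.
lemma pvALoop_acc : ∀ (n : Nat) (l : List Char) (skip : Bool) (acc : List Char),
    l.length ≤ n →
    pvALoop l skip acc = (acc ++ (pvALoop l skip []).1, (pvALoop l skip []).2) := by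
  intro n
  induction n with
  | zero =>
    intro l skip acc h
    match l with
    | [] => simp [pvALoop]
    | [a] => simp [pvALoop]
    | a :: b :: t => simp at h
  | succ n ih =>
    intro l skip acc h
    match l with
    | [] => simp [pvALoop]
    | [a] => simp [pvALoop]
    | a :: b :: t =>
      simp only [List.length_cons] at h
      have hbt : (b :: t).length ≤ n := by simp; omega
      by_cases hs : skip
      · subst hs
        simp only [pvALoop]
        exact ih (b :: t) false acc hbt
      · simp only [Bool.not_eq_true] at hs; subst hs
        by_cases h3 : a = '3' ∧ b = '3'
        · simp only [pvALoop, if_pos h3, if_neg (Bool.false_ne_true)]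
          exact ih (b :: t) true acc hbt
        · simp only [pvALoop, if_neg h3, if_neg (Bool.false_ne_true)]
          rw [ih (b :: t) false (acc ++ [a]) hbt]
          simp only [List.nil_append]
          rw [ih (b :: t) false [a] hbt]
          simp

-- A's whole computation (loop + last-character step) on a character list.
def pvRunA (l : List Char) : List Char :=
  let r := pvALoop l false []
  if r.2 then r.1 else r.1 ++ (PySem.List.pyGet? l (-1)).toList

lemma pvRunA_eq_pvG : ∀ (n : Nat) (l : List Char), l.length ≤ n → pvRunA l = pvG l := by
  intro n
  induction n with
  | zero =>
    intro l h
    have : l = [] := List.length_eq_zero_iff.mp (Nat.le_zero.mp h)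
    subst this
    simp [pvRunA, pvALoop, pvG, PySem.List.pyGet?_neg_one]
  | succ n ih =>
    intro l h
    match l with
    | [] => simp [pvRunA, pvALoop, pvG, PySem.List.pyGet?_neg_one]
    | [a] => simp [pvRunA, pvALoop, pvG, PySem.List.pyGet?_neg_one]
    | a :: b :: t =>
      simp only [List.length_cons] at h
      by_cases h3 : a = '3' ∧ b = '3'
      · -- pair consumed; the loop then skips b and continues on t
        match t with
        | [] =>
          obtain ⟨ha, hb⟩ := h3
          subst ha; subst hb
          simp [pvRunA, pvALoop, pvG]
        | c :: t' =>
          have hkey : pvALoop (a :: b :: c :: t') false [] = pvALoop (c :: t') false [] := by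
            simp [pvALoop, if_pos h3]
          have hlast : PySem.List.pyGet? (a :: b :: c :: t') (-1)
              = PySem.List.pyGet? (c :: t') (-1) := by
            simp [PySem.List.pyGet?_neg_one]
          have ht : (c :: t').length ≤ n := by simp at h ⊢; omega
          have : pvRunA (a :: b :: c :: t') = pvRunA (c :: t') := by
            simp only [pvRunA, hkey, hlast]
          rw [this, ih _ ht]
          simp [pvG, if_pos h3]
      · -- a kept; continue on b :: t
        have ht : (b :: t).length ≤ n := by simp at h ⊢; omega
        have hstep : pvALoop (a :: b :: t) false []
            = ([a] ++ (pvALoop (b :: t) false []).1, (pvALoop (b :: t) false []).2) := by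
          simp only [pvALoop, if_neg h3, if_neg (Bool.false_ne_true)]
          exact pvALoop_acc n (b :: t) false [a] ht
        have hlast : PySem.List.pyGet? (a :: b :: t) (-1)
            = PySem.List.pyGet? (b :: t) (-1) := by
          simp [PySem.List.pyGet?_neg_one]
        have hA : pvRunA (a :: b :: t) = a :: pvRunA (b :: t) := by
          simp only [pvRunA, hstep, hlast]
          by_cases hr : (pvALoop (b :: t) false []).2 <;> simp [hr]
        rw [hA, ih _ ht]
        simp [pvG, if_neg h3]

-- str.replace(s, '33', '') computes the same greedy removal.
lemma pvGo_eq_pvG : ∀ (fuel : Nat) (l acc : List Char), l.length ≤ fuel →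
    PySem.Chars.replace.go ['3', '3'] [] fuel l acc = acc.reverse ++ pvG l := by
  intro fuel
  induction fuel with
  | zero =>
    intro l acc h
    have : l = [] := List.length_eq_zero_iff.mp (Nat.le_zero.mp h)
    subst this
    simp [PySem.Chars.replace.go, pvG]
  | succ n ih =>
    intro l acc h
    match l with
    | [] => simp [PySem.Chars.replace.go, pvG]
    | c :: t =>
      simp only [List.length_cons] at h
      by_cases hp : List.isPrefixOf ['3', '3'] (c :: t) = true
      · obtain ⟨t₂, ht₂⟩ : ∃ t₂, c :: t = '3' :: '3' :: t₂ := by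
          rw [List.isPrefixOf_iff_prefix] at hp
          obtain ⟨u, hu⟩ := hp
          exact ⟨u, hu.symm⟩
        simp only [List.cons.injEq] at ht₂
        obtain ⟨hc, ht⟩ := ht₂
        subst hc; subst ht
        have h2 : t₂.length ≤ n := by simp at h; omega
        simp only [PySem.Chars.replace.go, if_pos hp]
        rw [show List.drop (['3', '3'] : List Char).length ('3' :: '3' :: t₂) = t₂ from rfl]
        rw [ih t₂ ([].reverse ++ acc) h2]
        simp [pvG]
      · have h2 : t.length ≤ n := by omega
        simp only [PySem.Chars.replace.go, if_neg hp]
        rw [ih t (c :: acc) h2]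
        match t with
        | [] => simp [pvG]
        | b :: t' =>
          have hcb : ¬ (c = '3' ∧ b = '3') := by
            intro ⟨hc, hb⟩
            subst hc; subst hb
            simp [List.isPrefixOf] at hp
          simp [pvG, if_neg hcb]

lemma pvReplace_eq_pvG (l : List Char) :
    PySem.Chars.replace l ['3', '3'] [] = pvG l := by
  rw [PySem.Chars.replace]
  simp only [List.isEmpty_cons]
  exact pvGo_eq_pvG l.length l [] le_rfl

-- ===== VERDICT (by name: the statement is the Claim_ definition above) =====
theorem remove_consecutive_3s_spec : Claim_equal_remove_consecutive_3s := by
  intro x _ _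
  have hB : (PySem.Str.replace (PySem.Int.toStr x) "33" "").toList
      = pvG (PySem.Int.toStr x).toList := by
    rw [PySem.Str.toList_replace]
    exact pvReplace_eq_pvG _
  have hA := pvRunA_eq_pvG (PySem.Int.toStr x).toList.length (PySem.Int.toStr x).toList le_rfl
  have hcond : (PySem.Str.replace (PySem.Int.toStr x) "33" "" = "")
      ↔ (pvG (PySem.Int.toStr x).toList = []) := by
    constructor
    · intro h
      rw [← hB, h]
      rfl
    · intro h
      exact String.toList_inj.mp (by rw [hB, h]; rfl)
  unfold Spec_remove_consecutive_3s remove_consecutive_3s remove_consecutive_3s_alt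
  unfold pvRunA at hA
  simp only [PySem.Int.ofStr?]
  simp only [] at hA ⊢
  rw [hA, hB, if_congr hcond rfl rfl]
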